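-- pv_equiv track=rewrite | github.com/andreaoliveira9/Projeto-IM-2 | app/main.py | intent_not_sure
-- ===== SOURCE A (Python) =====
-- def intent_not_sure(intent, entities):
--     if intent == "control_music":
--         action = next((e["value"] for e in entities if e["entity"] == "action"), None)
--
--         if action == "pause":
--             return "Penso que disseste que querias pausar a música, está certo?"
--         elif action == "resume":
--             return "Penso que disseste que querias continuar a música, está certo?"
--
--     elif intent == "change_track":
--         direction = next(
--             (e["value"] for e in entities if e["entity"] == "direction"), None
--         )
--
--         if direction == "next":
--             return "Penso que disseste que querias mudar para a próxima música, está certo?"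
--         elif direction == "previous":
--             return "Penso que disseste que querias mudar para a música anterior, está certo?"
--         elif direction == "same":
--             return "Penso que disseste que querias repetir a música atual, está certo?"
--
--     elif intent == "adjust_volume":
--         action = next((e["value"] for e in entities if e["entity"] == "action"), None)
--
--         if action == "increase":
--             return "Penso que disseste que querias aumentar o volume, está certo?"
--         elif action == "decrease":
--             return "Penso que disseste que querias diminuir o volume, está certo?"
--         elif action == "mute":
--             return "Penso que disseste que querias silenciar a música, está certo?"
--         elif action == "unmute":
--             return "Penso que disseste que querias ativar o som, está certo?"
--
--     elif intent == "set_mode":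
--         mode = next((e["value"] for e in entities if e["entity"] == "mode"), None)
--
--         if mode == "shuffle_on":
--             return "Penso que disseste que querias ativar o modo aleatório, está certo?"
--         elif mode == "shuffle_off":
--             return (
--                 "Penso que disseste que querias desativar o modo aleatório, está certo?"
--             )
--         elif mode == "repeat_one":
--             return "Penso que disseste que querias repetir a música atual, está certo?"
--         elif mode == "repeat_all":
--             return "Penso que disseste que querias repetir a lista de reprodução, está certo?"
--         elif mode == "repeat_off":
--             return "Penso que disseste que querias desativar a repetição, está certo?"
--
--     elif intent == "add_to_favorites":
--         return "Penso que disseste que querias adicionar a música aos favoritos, está certo?"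
--
--     elif intent == "search_music":
--         song = next((e["value"] for e in entities if e["entity"] == "song"), None)
--         artist = next((e["value"] for e in entities if e["entity"] == "artist"), None)
--
--         return f"Penso que disseste que querias pesquisar a música '{song}' de {artist}, está certo?"
--
--     elif intent == "add_music_to_queue":
--         song = next((e["value"] for e in entities if e["entity"] == "song"), None)
--         artist = next((e["value"] for e in entities if e["entity"] == "artist"), None)
--
--         return f"Penso que disseste que querias adicionar a música '{song}' de {artist} à fila de reprodução, está certo?"
--
--     elif intent == "wich_music_is_playing":
--         return "Penso que disseste que querias saber qual a música que está a tocar, está certo?"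
--
--     elif intent == "play_playlist":
--         playlist = next((e["value"] for e in entities if e["entity"] == "playlist"), "")
--
--         return (
--             f"Penso que disseste que querias tocar a playlist '{playlist}', está certo?"
--         )
--
--     elif intent == "add_music_to_playlist":
--         song = next((e["value"] for e in entities if e["entity"] == "song"), None)
--         artist = next((e["value"] for e in entities if e["entity"] == "artist"), None)
--         playlist = next(
--             (e["value"] for e in entities if e["entity"] == "playlist"), None
--         )
--
--         return f"Penso que disseste que querias adicionar a música '{song}' de {artist} à playlist '{playlist}', está certo?"
--
--     elif intent == "help":
--         option = next(
--             (e["value"] for e in entities if e["entity"] == "help_option"), None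
--         )
--
--         if option:
--             return f"Penso que disseste que querias ajuda sobre '{option}', está certo?"
--         else:
--             return "Penso que disseste que querias ajuda, está certo?"
--
--     elif intent == "goodbye":
--         return "Penso que disseste que querias fechar o aplicativo, está certo?"
-- ===== SOURCE B (Python) =====
-- # Staged rewrite: ONE eager pass over the entities builds a first-occurrence
-- # dict (entity -> value), so every per-intent entity scan disappears; the
-- # enumerated answers live in one flat (intent, value)-keyed message dict.
--
-- _MSGS = {
--     ("control_music", "pause"): "Penso que disseste que querias pausar a música, está certo?",
--     ("control_music", "resume"): "Penso que disseste que querias continuar a música, está certo?",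
--     ("change_track", "next"): "Penso que disseste que querias mudar para a próxima música, está certo?",
--     ("change_track", "previous"): "Penso que disseste que querias mudar para a música anterior, está certo?",
--     ("change_track", "same"): "Penso que disseste que querias repetir a música atual, está certo?",
--     ("adjust_volume", "increase"): "Penso que disseste que querias aumentar o volume, está certo?",
--     ("adjust_volume", "decrease"): "Penso que disseste que querias diminuir o volume, está certo?",
--     ("adjust_volume", "mute"): "Penso que disseste que querias silenciar a música, está certo?",
--     ("adjust_volume", "unmute"): "Penso que disseste que querias ativar o som, está certo?",
--     ("set_mode", "shuffle_on"): "Penso que disseste que querias ativar o modo aleatório, está certo?",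
--     ("set_mode", "shuffle_off"): "Penso que disseste que querias desativar o modo aleatório, está certo?",
--     ("set_mode", "repeat_one"): "Penso que disseste que querias repetir a música atual, está certo?",
--     ("set_mode", "repeat_all"): "Penso que disseste que querias repetir a lista de reprodução, está certo?",
--     ("set_mode", "repeat_off"): "Penso que disseste que querias desativar a repetição, está certo?",
--     ("add_to_favorites", None): "Penso que disseste que querias adicionar a música aos favoritos, está certo?",
--     ("wich_music_is_playing", None): "Penso que disseste que querias saber qual a música que está a tocar, está certo?",
--     ("goodbye", None): "Penso que disseste que querias fechar o aplicativo, está certo?",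
-- }
--
-- _KEY_ENTITY = {
--     "control_music": "action",
--     "change_track": "direction",
--     "adjust_volume": "action",
--     "set_mode": "mode",
-- }
--
--
-- def intent_not_sure(intent, entities):
--     env = {}
--     for e in entities:
--         env.setdefault(e.get("entity"), e.get("value"))
--
--     if intent == "search_music":
--         return f"Penso que disseste que querias pesquisar a música '{env.get('song')}' de {env.get('artist')}, está certo?"
--     if intent == "add_music_to_queue":
--         return f"Penso que disseste que querias adicionar a música '{env.get('song')}' de {env.get('artist')} à fila de reprodução, está certo?"
--     if intent == "play_playlist":
--         return f"Penso que disseste que querias tocar a playlist '{env.get('playlist', '')}', está certo?"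
--     if intent == "add_music_to_playlist":
--         return f"Penso que disseste que querias adicionar a música '{env.get('song')}' de {env.get('artist')} à playlist '{env.get('playlist')}', está certo?"
--     if intent == "help":
--         option = env.get("help_option")
--         if option:
--             return f"Penso que disseste que querias ajuda sobre '{option}', está certo?"
--         return "Penso que disseste que querias ajuda, está certo?"
--
--     key = _KEY_ENTITY.get(intent)
--     return _MSGS.get((intent, env.get(key) if key is not None else None))
-- ===== Notes on version B (the rewrite author's own statement) =====
-- stated objective: alternative
-- what changed: B makes one eager pass over entities building a first-occurrence entity->value dict with setdefault, so A's per-intent lazy scans disappear; the enumerated answers are then a single flat (intent, value)-keyed dict lookup, with only the templated intents and help left as code.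
import Mathlib
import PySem

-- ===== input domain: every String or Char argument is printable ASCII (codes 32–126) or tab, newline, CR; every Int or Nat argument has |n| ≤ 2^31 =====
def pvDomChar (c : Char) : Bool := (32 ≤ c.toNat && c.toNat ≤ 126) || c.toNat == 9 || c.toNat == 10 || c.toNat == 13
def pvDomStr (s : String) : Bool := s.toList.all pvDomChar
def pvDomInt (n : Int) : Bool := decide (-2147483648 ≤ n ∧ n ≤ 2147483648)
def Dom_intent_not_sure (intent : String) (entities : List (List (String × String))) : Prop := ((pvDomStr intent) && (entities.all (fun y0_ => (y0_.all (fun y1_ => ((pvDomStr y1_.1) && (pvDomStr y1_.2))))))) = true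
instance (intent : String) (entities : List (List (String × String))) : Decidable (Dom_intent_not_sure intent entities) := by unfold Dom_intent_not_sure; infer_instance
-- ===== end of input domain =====

-- B builds a first-occurrence entity->value dict in one eager pass (setdefault), replacing
-- A's per-intent lazy scans, and answers enumerated intents from one flat (intent, value)
-- message dict; equal return value on Pre_ (A may raise KeyError outside it).


-- ===== PORT A =====
-- next((e["value"] for e in entities if e["entity"] == name), None): first matching value.
-- (e["value"]/e["entity"] with the key missing is a KeyError in Python; Pre_ excludes those.)
def pyNext (entities : List (List (String × String))) (name : String) : Option String :=
  match entities with
  | [] => none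
  | e :: rest =>
    if List.lookup "entity" e = some name then List.lookup "value" e else pyNext rest name

-- f-string interpolation of an optional value (None prints as "None")
def fstr (o : Option String) : String :=
  match o with
  | some s => s
  | none => "None"

def intent_not_sure (intent : String) (entities : List (List (String × String))) : Option String :=
  if intent = "control_music" then
    let action := pyNext entities "action"
    if action = some "pause" then some "Penso que disseste que querias pausar a música, está certo?"
    else if action = some "resume" then some "Penso que disseste que querias continuar a música, está certo?"
    else none
  else if intent = "change_track" then
    let direction := pyNext entities "direction"
    if direction = some "next" then some "Penso que disseste que querias mudar para a próxima música, está certo?"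
    else if direction = some "previous" then some "Penso que disseste que querias mudar para a música anterior, está certo?"
    else if direction = some "same" then some "Penso que disseste que querias repetir a música atual, está certo?"
    else none
  else if intent = "adjust_volume" then
    let action := pyNext entities "action"
    if action = some "increase" then some "Penso que disseste que querias aumentar o volume, está certo?"
    else if action = some "decrease" then some "Penso que disseste que querias diminuir o volume, está certo?"
    else if action = some "mute" then some "Penso que disseste que querias silenciar a música, está certo?"
    else if action = some "unmute" then some "Penso que disseste que querias ativar o som, está certo?"
    else none
  else if intent = "set_mode" then
    let mode := pyNext entities "mode"
    if mode = some "shuffle_on" then some "Penso que disseste que querias ativar o modo aleatório, está certo?"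
    else if mode = some "shuffle_off" then some "Penso que disseste que querias desativar o modo aleatório, está certo?"
    else if mode = some "repeat_one" then some "Penso que disseste que querias repetir a música atual, está certo?"
    else if mode = some "repeat_all" then some "Penso que disseste que querias repetir a lista de reprodução, está certo?"
    else if mode = some "repeat_off" then some "Penso que disseste que querias desativar a repetição, está certo?"
    else none
  else if intent = "add_to_favorites" then
    some "Penso que disseste que querias adicionar a música aos favoritos, está certo?"
  else if intent = "search_music" then
    let song := pyNext entities "song"
    let artist := pyNext entities "artist"
    some ("Penso que disseste que querias pesquisar a música '" ++ fstr song ++ "' de " ++ fstr artist ++ ", está certo?")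
  else if intent = "add_music_to_queue" then
    let song := pyNext entities "song"
    let artist := pyNext entities "artist"
    some ("Penso que disseste que querias adicionar a música '" ++ fstr song ++ "' de " ++ fstr artist ++ " à fila de reprodução, está certo?")
  else if intent = "wich_music_is_playing" then
    some "Penso que disseste que querias saber qual a música que está a tocar, está certo?"
  else if intent = "play_playlist" then
    let playlist := (pyNext entities "playlist").getD ""
    some ("Penso que disseste que querias tocar a playlist '" ++ playlist ++ "', está certo?")
  else if intent = "add_music_to_playlist" then
    let song := pyNext entities "song"
    let artist := pyNext entities "artist"
    let playlist := pyNext entities "playlist"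
    some ("Penso que disseste que querias adicionar a música '" ++ fstr song ++ "' de " ++ fstr artist ++ " à playlist '" ++ fstr playlist ++ "', está certo?")
  else if intent = "help" then
    let option := pyNext entities "help_option"
    match option with
    | some s =>
      if s = "" then some "Penso que disseste que querias ajuda, está certo?"
      else some ("Penso que disseste que querias ajuda sobre '" ++ s ++ "', está certo?")
    | none => some "Penso que disseste que querias ajuda, está certo?"
  else if intent = "goodbye" then
    some "Penso que disseste que querias fechar o aplicativo, está certo?"
  else none

-- ===== PORT B =====
-- _MSGS: flat (intent, value)-keyed message dict (value None for the fixed-message intents)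
def bMsgs : List ((String × Option String) × String) :=
  [(("control_music", some "pause"), "Penso que disseste que querias pausar a música, está certo?"),
   (("control_music", some "resume"), "Penso que disseste que querias continuar a música, está certo?"),
   (("change_track", some "next"), "Penso que disseste que querias mudar para a próxima música, está certo?"),
   (("change_track", some "previous"), "Penso que disseste que querias mudar para a música anterior, está certo?"),
   (("change_track", some "same"), "Penso que disseste que querias repetir a música atual, está certo?"),
   (("adjust_volume", some "increase"), "Penso que disseste que querias aumentar o volume, está certo?"),
   (("adjust_volume", some "decrease"), "Penso que disseste que querias diminuir o volume, está certo?"),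
   (("adjust_volume", some "mute"), "Penso que disseste que querias silenciar a música, está certo?"),
   (("adjust_volume", some "unmute"), "Penso que disseste que querias ativar o som, está certo?"),
   (("set_mode", some "shuffle_on"), "Penso que disseste que querias ativar o modo aleatório, está certo?"),
   (("set_mode", some "shuffle_off"), "Penso que disseste que querias desativar o modo aleatório, está certo?"),
   (("set_mode", some "repeat_one"), "Penso que disseste que querias repetir a música atual, está certo?"),
   (("set_mode", some "repeat_all"), "Penso que disseste que querias repetir a lista de reprodução, está certo?"),
   (("set_mode", some "repeat_off"), "Penso que disseste que querias desativar a repetição, está certo?"),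
   (("add_to_favorites", none), "Penso que disseste que querias adicionar a música aos favoritos, está certo?"),
   (("wich_music_is_playing", none), "Penso que disseste que querias saber qual a música que está a tocar, está certo?"),
   (("goodbye", none), "Penso que disseste que querias fechar o aplicativo, está certo?")]

-- _KEY_ENTITY: which entity an enumerated intent consults
def bKeyEntity : List (String × String) :=
  [("control_music", "action"), ("change_track", "direction"),
   ("adjust_volume", "action"), ("set_mode", "mode")]

-- env = {}; for e in entities: env.setdefault(e.get("entity"), e.get("value"))
-- (keys/values are e.get results, i.e. Option String; first occurrence of a key wins)
def bEnv (entities : List (List (String × String))) : PySem.Dict (Option String) (Option String) :=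
  entities.foldl
    (fun d e => d.setdefault (List.lookup "entity" e) (List.lookup "value" e))
    PySem.Dict.empty

-- env.get(name): stored None and absent key both read back as Python None
def bGet (env : PySem.Dict (Option String) (Option String)) (name : String) : Option String :=
  (env.get? (some name)).join

def intent_not_sure_alt (intent : String) (entities : List (List (String × String))) : Option String :=
  let env := bEnv entities
  if intent = "search_music" then
    some ("Penso que disseste que querias pesquisar a música '" ++ fstr (bGet env "song") ++ "' de " ++ fstr (bGet env "artist") ++ ", está certo?")
  else if intent = "add_music_to_queue" then
    some ("Penso que disseste que querias adicionar a música '" ++ fstr (bGet env "song") ++ "' de " ++ fstr (bGet env "artist") ++ " à fila de reprodução, está certo?")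
  else if intent = "play_playlist" then
    -- env.get('playlist', ''): default only when the key is absent
    some ("Penso que disseste que querias tocar a playlist '" ++ fstr ((env.get? (some "playlist")).getD (some "")) ++ "', está certo?")
  else if intent = "add_music_to_playlist" then
    some ("Penso que disseste que querias adicionar a música '" ++ fstr (bGet env "song") ++ "' de " ++ fstr (bGet env "artist") ++ " à playlist '" ++ fstr (bGet env "playlist") ++ "', está certo?")
  else if intent = "help" then
    match bGet env "help_option" with
    | some s =>
      if s = "" then some "Penso que disseste que querias ajuda, está certo?"
      else some ("Penso que disseste que querias ajuda sobre '" ++ s ++ "', está certo?")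
    | none => some "Penso que disseste que querias ajuda, está certo?"
  else
    let value := match List.lookup intent bKeyEntity with
                 | some k => bGet env k
                 | none => none
    List.lookup (intent, value) bMsgs

-- ===== PRECONDITION & SPEC =====
-- Pre_ excludes inputs where, under an entity-scanning intent, some entity dict lacks an
-- "entity" or "value" key: there Python A may raise KeyError (it raises lazily, so on some
-- such inputs A still returns — those are also excluded; see the cite in the claim).
def Pre_intent_not_sure (intent : String) (entities : List (List (String × String))) : Prop :=
  intent ∈ ["control_music", "change_track", "adjust_volume", "set_mode", "search_music",
            "add_music_to_queue", "play_playlist", "add_music_to_playlist", "help"] →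
  ∀ e ∈ entities, (List.lookup "entity" e).isSome ∧ (List.lookup "value" e).isSome

instance (intent : String) (entities : List (List (String × String))) : Decidable (Pre_intent_not_sure intent entities) := by unfold Pre_intent_not_sure; infer_instance

def pvWitness_intent_not_sure : String × (List (List (String × String))) :=
  ("control_music", [[("entity", "action"), ("value", "pause")]])

def Spec_intent_not_sure (intent : String) (entities : List (List (String × String))) (out : Option String) : Prop := out = intent_not_sure_alt intent entities
instance (intent : String) (entities : List (List (String × String))) (out : Option String) : Decidable (Spec_intent_not_sure intent entities out) := by unfold Spec_intent_not_sure; infer_instance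

-- ===== CLAIM (what is proved, stated in full; the proofs are below) =====
def Claim_equal_intent_not_sure : Prop := ∀ (intent : String) (entities : List (List (String × String))), Dom_intent_not_sure intent entities → Pre_intent_not_sure intent entities → Spec_intent_not_sure intent entities (intent_not_sure intent entities)

-- ===== LEMMAS AND PROOFS =====
theorem witness_ok : Dom_intent_not_sure pvWitness_intent_not_sure.1 pvWitness_intent_not_sure.2 ∧
    Pre_intent_not_sure pvWitness_intent_not_sure.1 pvWitness_intent_not_sure.2 := by decide

-- a setdefault loop reads back as first-match lookup in the generated pair list
theorem get?_foldl_setdefault {κ ν α : Type} [DecidableEq κ] [BEq κ] [LawfulBEq κ]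
    (l : List α) (fk : α → κ) (fv : α → ν) (d : PySem.Dict κ ν) (k : κ) :
    (l.foldl (fun d e => d.setdefault (fk e) (fv e)) d).get? k
      = (d.get? k).or (List.lookup k (l.map (fun e => (fk e, fv e)))) := by
  induction l generalizing d with
  | nil => simp
  | cons e rest ih =>
    simp only [List.foldl_cons, List.map_cons, List.lookup_cons, ih]
    by_cases hk : fk e = k
    · subst hk
      simp only [beq_self_eq_true]
      cases hg : d.get? (fk e) with
      | some w =>
        have hc : d.contains (fk e) = true := by
          rw [PySem.Dict.contains_eq_isSome_get?, hg]; rfl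
        rw [PySem.Dict.setdefault_of_contains _ _ hc, hg]
        simp
      | none =>
        have hc : d.contains (fk e) = false := by
          rw [PySem.Dict.contains_eq_isSome_get?, hg]; rfl
        rw [PySem.Dict.setdefault_of_not_contains _ _ hc, PySem.Dict.get?_insert, if_pos rfl]
        simp
    · simp only [beq_eq_false_iff_ne.mpr (Ne.symm hk)]
      by_cases hc : d.contains (fk e) = true
      · rw [PySem.Dict.setdefault_of_contains _ _ hc]
      · simp only [Bool.not_eq_true] at hc
        rw [PySem.Dict.setdefault_of_not_contains _ _ hc, PySem.Dict.get?_insert, if_neg (fun h => hk h.symm)]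

-- under key presence, the env lookup is exactly A's first-match scan
theorem env_get?_eq (entities : List (List (String × String))) (name : String)
    (h : ∀ e ∈ entities, (List.lookup "entity" e).isSome ∧ (List.lookup "value" e).isSome) :
    (bEnv entities).get? (some name) = (pyNext entities name).map some := by
  unfold bEnv
  rw [get?_foldl_setdefault]
  simp only [PySem.Dict.get?_empty, Option.or]
  induction entities with
  | nil => rfl
  | cons e rest ih =>
    obtain ⟨he, hv⟩ := h e (by simp)
    cases hge : List.lookup "entity" e with
    | none => rw [hge] at he; simp at he
    | some s =>
      cases hgv : List.lookup "value" e with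
      | none => rw [hgv] at hv; simp at hv
      | some v =>
        simp only [List.map_cons, List.lookup_cons, pyNext, hge, hgv]
        by_cases hs : s = name
        · subst hs; simp
        · have hne : (some name == some s) = false := by
            simp only [beq_eq_false_iff_ne, ne_eq, Option.some.injEq]
            exact fun h => hs h.symm
          rw [hne]
          rw [if_neg (show ¬ (some s = some name) by simp [hs])]
          exact ih (fun e' he' => h e' (List.mem_cons_of_mem _ he'))

theorem bGet_eq (entities : List (List (String × String))) (name : String)
    (h : ∀ e ∈ entities, (List.lookup "entity" e).isSome ∧ (List.lookup "value" e).isSome) :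
    bGet (bEnv entities) name = pyNext entities name := by
  unfold bGet
  rw [env_get?_eq entities name h]
  cases pyNext entities name <;> rfl

-- ===== VERDICT (by name: the statement is the Claim_ definition above) =====
-- a (intent, value) key that matches no entry of a literal message table
theorem lookup_pair_none {β : Type} (i : String) (v : Option String)
    (l : List ((String × Option String) × β))
    (h : ∀ p ∈ l, ¬ ((i, v) = p.1)) : List.lookup (i, v) l = none := by
  induction l with
  | nil => rfl
  | cons p rest ih =>
    rw [List.lookup_cons]
    rw [beq_eq_false_iff_ne.mpr (h p (by simp))]
    exact ih (fun q hq => h q (List.mem_cons_of_mem _ hq))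

theorem intent_not_sure_spec : Claim_equal_intent_not_sure := by
  intro intent entities _ hpre
  unfold Pre_intent_not_sure at hpre
  unfold Spec_intent_not_sure intent_not_sure intent_not_sure_alt
  by_cases h1 : intent = "control_music"
  · subst h1
    have hk := hpre (by decide)
    simp [bKeyEntity, bGet_eq entities _ hk]
    cases hv : pyNext entities "action" with
    | none => rfl
    | some v =>
      by_cases hv0 : v = "pause"
      · subst hv0; rfl
      by_cases hv1 : v = "resume"
      · subst hv1; rfl
      rw [if_neg (by simp [hv0]), if_neg (by simp [hv1])]
      refine (lookup_pair_none _ _ _ ?_).symm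
      intro p hp
      simp only [bMsgs] at hp
      fin_cases hp <;> simp [hv0, hv1]
  by_cases h2 : intent = "change_track"
  · subst h2
    have hk := hpre (by decide)
    simp [bKeyEntity, List.lookup, bGet_eq entities _ hk]
    cases hv : pyNext entities "direction" with
    | none => rfl
    | some v =>
      by_cases hv0 : v = "next"
      · subst hv0; rfl
      by_cases hv1 : v = "previous"
      · subst hv1; rfl
      by_cases hv2 : v = "same"
      · subst hv2; rfl
      rw [if_neg (by simp [hv0]), if_neg (by simp [hv1]), if_neg (by simp [hv2])]
      refine (lookup_pair_none _ _ _ ?_).symm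
      intro p hp
      simp only [bMsgs] at hp
      fin_cases hp <;> simp [hv0, hv1, hv2]
  by_cases h3 : intent = "adjust_volume"
  · subst h3
    have hk := hpre (by decide)
    simp [bKeyEntity, List.lookup, bGet_eq entities _ hk]
    cases hv : pyNext entities "action" with
    | none => rfl
    | some v =>
      by_cases hv0 : v = "increase"
      · subst hv0; rfl
      by_cases hv1 : v = "decrease"
      · subst hv1; rfl
      by_cases hv2 : v = "mute"
      · subst hv2; rfl
      by_cases hv3 : v = "unmute"
      · subst hv3; rfl
      rw [if_neg (by simp [hv0]), if_neg (by simp [hv1]), if_neg (by simp [hv2]), if_neg (by simp [hv3])]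
      refine (lookup_pair_none _ _ _ ?_).symm
      intro p hp
      simp only [bMsgs] at hp
      fin_cases hp <;> simp [hv0, hv1, hv2, hv3]
  by_cases h4 : intent = "set_mode"
  · subst h4
    have hk := hpre (by decide)
    simp [bKeyEntity, List.lookup, bGet_eq entities _ hk]
    cases hv : pyNext entities "mode" with
    | none => rfl
    | some v =>
      by_cases hv0 : v = "shuffle_on"
      · subst hv0; rfl
      by_cases hv1 : v = "shuffle_off"
      · subst hv1; rfl
      by_cases hv2 : v = "repeat_one"
      · subst hv2; rfl
      by_cases hv3 : v = "repeat_all"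
      · subst hv3; rfl
      by_cases hv4 : v = "repeat_off"
      · subst hv4; rfl
      rw [if_neg (by simp [hv0]), if_neg (by simp [hv1]), if_neg (by simp [hv2]), if_neg (by simp [hv3]), if_neg (by simp [hv4])]
      refine (lookup_pair_none _ _ _ ?_).symm
      intro p hp
      simp only [bMsgs] at hp
      fin_cases hp <;> simp [hv0, hv1, hv2, hv3, hv4]
  by_cases h5 : intent = "add_to_favorites"
  · subst h5; rfl
  by_cases h6 : intent = "search_music"
  · subst h6
    have hk := hpre (by decide)
    simp [bGet_eq entities _ hk]
  by_cases h7 : intent = "add_music_to_queue"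
  · subst h7
    have hk := hpre (by decide)
    simp [bGet_eq entities _ hk]
  by_cases h8 : intent = "wich_music_is_playing"
  · subst h8; rfl
  by_cases h9 : intent = "play_playlist"
  · subst h9
    have hk := hpre (by decide)
    simp only [env_get?_eq entities _ hk]
    cases hv : pyNext entities "playlist" with
    | none => simp [fstr]
    | some v => simp [fstr]
  by_cases h10 : intent = "add_music_to_playlist"
  · subst h10
    have hk := hpre (by decide)
    simp [bGet_eq entities _ hk]
  by_cases h11 : intent = "help"
  · subst h11
    have hk := hpre (by decide)
    simp [bGet_eq entities _ hk]
  by_cases h12 : intent = "goodbye"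
  · subst h12; rfl
  simp only [if_neg h6, if_neg h7, if_neg h9, if_neg h10, if_neg h11, if_neg h1, if_neg h2,
             if_neg h3, if_neg h4, if_neg h5, if_neg h8, if_neg h12, bKeyEntity,
             List.lookup_cons, beq_eq_false_iff_ne.mpr h1, beq_eq_false_iff_ne.mpr h2,
             beq_eq_false_iff_ne.mpr h3, beq_eq_false_iff_ne.mpr h4]
  refine (lookup_pair_none _ _ _ ?_).symm
  intro p hp
  simp only [bMsgs] at hp
  fin_cases hp <;> simp [h1, h2, h3, h4, h5, h8, h12]
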